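-- pv_equiv track=rewrite | github.com/AlperenTurkmen/job-finder | tools/scrapers/netflix_apply.py | _handle_demographic_checkbox
-- ===== SOURCE A (Python) =====
-- from typing import Optional
--
-- def _handle_demographic_checkbox(label: str) -> Optional[str]:
--     """Handle demographic survey checkboxes - prefer 'I choose not to disclose'."""
--     label_lower = label.lower()
--
--     # STRATEGY: For all demographic questions, select "I choose not to disclose" / "Prefer not to say"
--     # This is the safest and most privacy-respecting approach
--
--     # Check if this IS the "prefer not to disclose" option - SELECT IT
--     decline_phrases = [
--         "choose not to disclose", "prefer not to", "prefer not to say",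
--         "decline to answer", "do not wish", "rather not say"
--     ]
--     if any(phrase in label_lower for phrase in decline_phrases):
--         return "yes"  # Select this option!
--
--     # Gender options - don't select any specific gender
--     gender_options = ["man", "woman", "non-binary", "agender", "genderfluid",
--                      "genderqueer", "gender non-conforming", "transgender"]
--     if any(g == label_lower or label_lower.startswith(g + " ") for g in gender_options):
--         return "no"
--
--     # Ethnicity options - don't select any specific ethnicity
--     ethnicity_keywords = ["asian", "black", "arab", "chinese", "indian", "pakistani",
--                         "bangladeshi", "caribbean", "african", "irish", "gypsy",
--                         "welsh", "scottish", "british", "white", "mixed", "other ethnic"]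
--     if any(kw in label_lower for kw in ethnicity_keywords):
--         return "no"
--
--     # Sexuality options - don't select any specific sexuality
--     sexuality_options = ["heterosexual", "gay", "lesbian", "bisexual", "pansexual",
--                        "asexual", "queer", "homosexual", "straight"]
--     if any(s in label_lower for s in sexuality_options):
--         return "no"
--
--     # Disability disclosure - prefer not to disclose
--     if "disability" in label_lower or "disabled" in label_lower:
--         return "no"
--
--     # Transgender experience - prefer not to disclose
--     if "transgender" in label_lower or "trans " in label_lower:
--         return "no"
--
--     # Caregiver status - prefer not to disclose
--     if "caregiver" in label_lower or "dependent" in label_lower or "primary care" in label_lower: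
--         return "no"
--
--     # Veteran status - prefer not to disclose
--     if "veteran" in label_lower or "military" in label_lower:
--         return "no"
--
--     # "Not Listed" option - don't select
--     if "not listed" in label_lower:
--         return "no"
--
--     # Auto-accept agreements/consents
--     if any(word in label_lower for word in ["agree", "consent", "acknowledge", "confirm", "accept"]):
--         return "yes"
--
--     return None
-- ===== SOURCE B (Python) =====
-- from typing import Optional
--
-- # A naive multi-pattern matcher: instead of testing each category in turn with an
-- # early return, scan the lowercased label position by position once, record the
-- # best (lowest) priority of any phrase found anchored at any position, and map
-- # that priority to its answer at the end.  Gender phrases, which must match the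
-- # whole label or a leading word, are tested with a single anchored prefix check
-- # against the space-padded label ("g == low or low.startswith(g + ' ')" is
-- # equivalent to "(low + ' ').startswith(g + ' ')").
--
-- # Answer for each priority (category) 0..9.
-- _RESULTS = ["yes", "no", "no", "no", "no", "no", "no", "no", "no", "yes"]
--
-- # (phrase, priority) for every phrase matched anywhere in the label.
-- _SUBSTR = [
--     ("choose not to disclose", 0), ("prefer not to", 0), ("prefer not to say", 0),
--     ("decline to answer", 0), ("do not wish", 0), ("rather not say", 0),
--     ("asian", 2), ("black", 2), ("arab", 2), ("chinese", 2), ("indian", 2),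
--     ("pakistani", 2), ("bangladeshi", 2), ("caribbean", 2), ("african", 2),
--     ("irish", 2), ("gypsy", 2), ("welsh", 2), ("scottish", 2), ("british", 2),
--     ("white", 2), ("mixed", 2), ("other ethnic", 2),
--     ("heterosexual", 3), ("gay", 3), ("lesbian", 3), ("bisexual", 3),
--     ("pansexual", 3), ("asexual", 3), ("queer", 3), ("homosexual", 3),
--     ("straight", 3),
--     ("disability", 4), ("disabled", 4),
--     ("transgender", 5), ("trans ", 5),
--     ("caregiver", 6), ("dependent", 6), ("primary care", 6),
--     ("veteran", 7), ("military", 7),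
--     ("not listed", 8),
--     ("agree", 9), ("consent", 9), ("acknowledge", 9), ("confirm", 9),
--     ("accept", 9),
-- ]
--
-- # Phrases matched only as the whole label or its leading word (priority 1).
-- _GENDERS = ["man", "woman", "non-binary", "agender", "genderfluid",
--             "genderqueer", "gender non-conforming", "transgender"]
--
--
-- def _handle_demographic_checkbox(label: str) -> Optional[str]:
--     low = label.lower()
--     best = None  # lowest priority matched so far
--
--     padded = low + " "
--     for g in _GENDERS:
--         if padded.startswith(g + " "):
--             if best is None or 1 < best:
--                 best = 1
--
--     for i in range(len(low) + 1):  # one scan over all positions of the label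
--         tail = low[i:]
--         for phrase, prio in _SUBSTR:
--             if tail.startswith(phrase):
--                 if best is None or prio < best:
--                     best = prio
--
--     return _RESULTS[best] if best is not None else None
-- ===== Notes on version B (the rewrite author's own statement) =====
-- stated objective: alternative
-- what changed: Replaced the ordered early-return chain of per-category any()-substring tests with a naive multi-pattern matcher: one scan over each position of the lowercased label checking every phrase anchored there, aggregating the minimum matched category priority (no early return), with gender's exact-or-leading-word test folded into a single anchored prefix check on the space-padded label, and the priority mapped to its answer at the end.
import Mathlib
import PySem

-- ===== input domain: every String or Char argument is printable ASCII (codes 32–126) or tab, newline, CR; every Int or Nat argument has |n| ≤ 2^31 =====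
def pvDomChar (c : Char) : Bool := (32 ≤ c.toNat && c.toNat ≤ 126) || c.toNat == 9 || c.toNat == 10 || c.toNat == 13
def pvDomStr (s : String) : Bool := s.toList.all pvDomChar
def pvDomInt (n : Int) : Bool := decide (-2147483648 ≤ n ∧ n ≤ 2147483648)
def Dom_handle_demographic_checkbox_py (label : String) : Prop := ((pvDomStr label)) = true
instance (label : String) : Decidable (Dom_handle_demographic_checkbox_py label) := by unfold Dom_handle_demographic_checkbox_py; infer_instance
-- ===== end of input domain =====

-- B replaces A's ordered early-return chain of any()-substring tests by a naive multi-pattern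
-- matcher: one scan over the label's positions aggregating the minimum matched category
-- priority, gender tested as an anchored prefix of the space-padded label (alternative algorithm).


-- ===== PORT A =====
def handle_demographic_checkbox_py (label : String) : Option String :=
  let label_lower := PySem.Str.lower label
  if (["choose not to disclose", "prefer not to", "prefer not to say",
       "decline to answer", "do not wish", "rather not say"]).any
      (fun phrase => PySem.Str.isIn phrase label_lower) then
    some "yes"
  else if (["man", "woman", "non-binary", "agender", "genderfluid",
            "genderqueer", "gender non-conforming", "transgender"]).any
      (fun g => g == label_lower || PySem.Str.startswith label_lower (g ++ " ")) then
    some "no"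
  else if (["asian", "black", "arab", "chinese", "indian", "pakistani",
            "bangladeshi", "caribbean", "african", "irish", "gypsy",
            "welsh", "scottish", "british", "white", "mixed", "other ethnic"]).any
      (fun kw => PySem.Str.isIn kw label_lower) then
    some "no"
  else if (["heterosexual", "gay", "lesbian", "bisexual", "pansexual",
            "asexual", "queer", "homosexual", "straight"]).any
      (fun s => PySem.Str.isIn s label_lower) then
    some "no"
  else if PySem.Str.isIn "disability" label_lower || PySem.Str.isIn "disabled" label_lower then
    some "no"
  else if PySem.Str.isIn "transgender" label_lower || PySem.Str.isIn "trans " label_lower then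
    some "no"
  else if PySem.Str.isIn "caregiver" label_lower || PySem.Str.isIn "dependent" label_lower
          || PySem.Str.isIn "primary care" label_lower then
    some "no"
  else if PySem.Str.isIn "veteran" label_lower || PySem.Str.isIn "military" label_lower then
    some "no"
  else if PySem.Str.isIn "not listed" label_lower then
    some "no"
  else if (["agree", "consent", "acknowledge", "confirm", "accept"]).any
      (fun word => PySem.Str.isIn word label_lower) then
    some "yes"
  else
    none

-- ===== PORT B =====
-- answer for each priority (category) 0..9
def pvResults : List String := ["yes", "no", "no", "no", "no", "no", "no", "no", "no", "yes"]

-- (phrase, priority) for every phrase matched anywhere in the label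
def pvSubstr : List (String × Nat) :=
  [("choose not to disclose", 0), ("prefer not to", 0), ("prefer not to say", 0),
   ("decline to answer", 0), ("do not wish", 0), ("rather not say", 0),
   ("asian", 2), ("black", 2), ("arab", 2), ("chinese", 2), ("indian", 2),
   ("pakistani", 2), ("bangladeshi", 2), ("caribbean", 2), ("african", 2),
   ("irish", 2), ("gypsy", 2), ("welsh", 2), ("scottish", 2), ("british", 2),
   ("white", 2), ("mixed", 2), ("other ethnic", 2),
   ("heterosexual", 3), ("gay", 3), ("lesbian", 3), ("bisexual", 3),
   ("pansexual", 3), ("asexual", 3), ("queer", 3), ("homosexual", 3),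
   ("straight", 3),
   ("disability", 4), ("disabled", 4),
   ("transgender", 5), ("trans ", 5),
   ("caregiver", 6), ("dependent", 6), ("primary care", 6),
   ("veteran", 7), ("military", 7),
   ("not listed", 8),
   ("agree", 9), ("consent", 9), ("acknowledge", 9), ("confirm", 9),
   ("accept", 9)]

-- phrases matched only as the whole label or its leading word (priority 1)
def pvGenders : List String :=
  ["man", "woman", "non-binary", "agender", "genderfluid",
   "genderqueer", "gender non-conforming", "transgender"]

-- 'if best is None or prio < best: best = prio'
def pvUpd (best : Option Nat) (prio : Nat) : Option Nat :=
  match best with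
  | none => some prio
  | some m => if prio < m then some prio else some m

def handle_demographic_checkbox_py_alt (label : String) : Option String :=
  let low := PySem.Str.lower label
  let padded := low ++ " "
  let best0 := pvGenders.foldl
    (fun best g => if PySem.Str.startswith padded (g ++ " ") then pvUpd best 1 else best) none
  let best := (PySem.List.pyRange 0 (PySem.Str.len low + 1) 1).foldl
    (fun best i =>
      let tail := PySem.Str.slice low (some i) none
      pvSubstr.foldl
        (fun best pr => if PySem.Str.startswith tail pr.1 then pvUpd best pr.2 else best)
        best) best0
  match best with
  | some p => PySem.List.pyGet? pvResults (p : Int)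
  | none => none

-- ===== PRECONDITION & SPEC =====
def Spec_handle_demographic_checkbox_py (label : String) (out : Option String) : Prop := out = handle_demographic_checkbox_py_alt label
instance (label : String) (out : Option String) : Decidable (Spec_handle_demographic_checkbox_py label out) := by unfold Spec_handle_demographic_checkbox_py; infer_instance

-- ===== CLAIM =====
def Claim_equal_handle_demographic_checkbox_py : Prop := ∀ (label : String), Dom_handle_demographic_checkbox_py label → Spec_handle_demographic_checkbox_py label (handle_demographic_checkbox_py label)

-- ===== LEMMAS AND PROOFS =====

theorem pvUpd_comm (b : Option Nat) (p q : Nat) : pvUpd (pvUpd b p) q = pvUpd (pvUpd b q) p := by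
  rcases b with _ | m <;>
    simp only [pvUpd] <;> split_ifs <;> (try simp only [pvUpd]) <;> (try split_ifs) <;>
      simp_all <;> omega

theorem pvUpd_idem (b : Option Nat) (p : Nat) : pvUpd (pvUpd b p) p = pvUpd b p := by
  rcases b with _ | m <;>
    simp only [pvUpd] <;> split_ifs <;> (try simp only [pvUpd]) <;> (try split_ifs) <;>
      simp_all

-- a pvUpd application commutes past the whole scan loop
theorem pvUpd_foldl {α : Type} (l : List α) (f : α → Bool) (k : α → Nat) (b : Option Nat) (p : Nat) :
    l.foldl (fun b x => if f x then pvUpd b (k x) else b) (pvUpd b p)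
      = pvUpd (l.foldl (fun b x => if f x then pvUpd b (k x) else b) b) p := by
  induction l generalizing b with
  | nil => rfl
  | cons x l ih =>
    simp only [List.foldl_cons]
    rw [show (if f x then pvUpd (pvUpd b p) (k x) else pvUpd b p)
          = pvUpd (if f x then pvUpd b (k x) else b) p from by
      cases h : f x <;> simp [pvUpd_comm]]
    exact ih _

-- two scans over the pattern list combine into one with disjoined tests
theorem pv_combine {α : Type} (l : List α) (p q : α → Bool) (k : α → Nat) (b : Option Nat) :
    l.foldl (fun b x => if q x then pvUpd b (k x) else b)
      (l.foldl (fun b x => if p x then pvUpd b (k x) else b) b)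
      = l.foldl (fun b x => if p x || q x then pvUpd b (k x) else b) b := by
  induction l generalizing b with
  | nil => rfl
  | cons x l ih =>
    simp only [List.foldl_cons]
    rw [show (if q x then pvUpd (l.foldl (fun b x => if p x then pvUpd b (k x) else b)
                (if p x then pvUpd b (k x) else b)) (k x)
              else l.foldl (fun b x => if p x then pvUpd b (k x) else b)
                (if p x then pvUpd b (k x) else b))
          = l.foldl (fun b x => if p x then pvUpd b (k x) else b)
              (if q x then pvUpd (if p x then pvUpd b (k x) else b) (k x)
               else (if p x then pvUpd b (k x) else b)) from by
      cases h : q x <;> simp [pvUpd_foldl]]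
    rw [ih]
    congr 1
    cases hp : p x <;> cases hq : q x <;> simp [pvUpd_idem]

-- loop interchange: position-major double scan = pattern-major scan with an 'any' test
theorem pv_swap {ι α : Type} (is : List ι) (ps : List α) (hit : ι → α → Bool) (k : α → Nat)
    (b0 : Option Nat) :
    is.foldl (fun b i => ps.foldl (fun b x => if hit i x then pvUpd b (k x) else b) b) b0
      = ps.foldl (fun b x => if is.any (fun i => hit i x) then pvUpd b (k x) else b) b0 := by
  induction is generalizing b0 with
  | nil =>
    simp only [List.foldl_nil, List.any_nil, Bool.false_eq_true, if_false]
    induction ps with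
    | nil => rfl
    | cons x ps ihp => simpa using ihp
  | cons i is ih =>
    simp only [List.foldl_cons, List.any_cons]
    rw [ih, pv_combine]
    rfl


-- scanning every position for an anchored match IS the substring test
theorem pv_hit_any (low p : String) :
    ((PySem.List.pyRange 0 (PySem.Str.len low + 1) 1).any
      (fun i => PySem.Str.startswith (PySem.Str.slice low (some i) none) p))
      = PySem.Str.isIn p low := by
  have h1 : (PySem.Str.len low + 1 : Int) = ((low.toList.length + 1 : Nat) : Int) := by
    simp [PySem.Str.len_eq]
  rw [h1, PySem.List.pyRange_zero_natCast, List.any_map]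
  simp only [Function.comp_def, PySem.Str.startswith_eq, PySem.Str.toList_slice,
    PySem.Chars.slice_eq_listSlice, PySem.List.slice_from_natCast, PySem.Str.isIn_eq]
  apply Bool.coe_iff_coe.mp
  rw [← PySem.Chars.exists_prefix_drop_iff_isIn]
  simp only [List.any_eq_true, List.mem_range, PySem.Chars.startswith_iff]
  constructor
  · rintro ⟨k, _, hk⟩; exact ⟨k, hk⟩
  · rintro ⟨j, hj⟩
    by_cases hle : j ≤ low.toList.length
    · exact ⟨j, by omega, hj⟩
    · refine ⟨low.toList.length, by omega, ?_⟩
      rw [List.drop_eq_nil_of_le (by omega)] at hj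
      rw [List.drop_eq_nil_of_le (by omega)]
      exact hj

-- the anchored padded-prefix test IS 'g == low or low.startswith(g + " ")'
theorem pv_padded_chars (G L : List Char) (c : Char) :
    (G ++ [c]) <+: (L ++ [c]) ↔ (G = L ∨ (G ++ [c]) <+: L) := by
  constructor
  · intro h
    rcases Nat.lt_trichotomy G.length L.length with hl | hl | hl
    · right
      have ht : G ++ [c] = (L ++ [c]).take (G ++ [c]).length := List.prefix_iff_eq_take.mp h
      rw [List.take_append_of_le_length (by simp; omega)] at ht
      rw [ht]
      exact List.take_prefix _ _
    · left
      have ht : G ++ [c] = (L ++ [c]).take (G ++ [c]).length := List.prefix_iff_eq_take.mp h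
      have hfull : (L ++ [c]).take (G ++ [c]).length = L ++ [c] := by
        apply List.take_of_length_le; simp; omega
      rw [hfull] at ht
      exact List.append_cancel_right ht
    · exfalso
      have := h.length_le
      simp at this
      omega
  · rintro (rfl | h)
    · rfl
    · exact h.trans (List.prefix_append _ _)

theorem pv_padded (low g : String) :
    PySem.Str.startswith (low ++ " ") (g ++ " ")
      = (g == low || PySem.Str.startswith low (g ++ " ")) := by
  apply Bool.coe_iff_coe.mp
  simp only [PySem.Str.startswith_eq, String.toList_append, PySem.Chars.startswith_iff,
    Bool.or_eq_true, beq_iff_eq]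
  have hsp : (" " : String).toList = [' '] := rfl
  rw [hsp, pv_padded_chars]
  constructor
  · rintro (h | h)
    · exact Or.inl (String.toList_inj.mp h)
    · exact Or.inr h
  · rintro (h | h)
    · exact Or.inl (String.toList_inj.mpr h)
    · exact Or.inr h

-- once the minimum is at most every remaining priority the scan is a no-op
theorem pv_fold_noop (low : String) (ps : List (String × Nat)) (m : Nat)
    (h : ∀ pr ∈ ps, m ≤ pr.2) :
    ps.foldl (fun b pr => if PySem.Str.isIn pr.1 low then pvUpd b pr.2 else b) (some m)
      = some m := by
  induction ps with
  | nil => rfl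
  | cons pr ps ih =>
    simp only [List.foldl_cons]
    have hm : m ≤ pr.2 := h pr (List.mem_cons_self)
    have hupd : pvUpd (some m) pr.2 = some m := by
      simp only [pvUpd]; rw [if_neg (by omega)]
    rcases hcond : PySem.Str.isIn pr.1 low with _ | _ <;>
      simp only [if_true, if_false, Bool.false_eq_true, hupd] <;>
      exact ih (fun x hx => h x (List.mem_cons_of_mem _ hx))

-- over a priority-sorted table the min-aggregating scan is decided by the first hit
theorem pv_fold_first (low : String) (ps : List (String × Nat))
    (h : ps.Pairwise (fun x y => x.2 ≤ y.2)) (b0 : Option Nat) :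
    ps.foldl (fun b pr => if PySem.Str.isIn pr.1 low then pvUpd b pr.2 else b) b0
      = match ps.find? (fun pr => PySem.Str.isIn pr.1 low) with
        | some pr => pvUpd b0 pr.2
        | none => b0 := by
  induction ps generalizing b0 with
  | nil => rfl
  | cons pr ps ih =>
    simp only [List.foldl_cons, List.find?_cons]
    rcases List.pairwise_cons.mp h with ⟨hhead, htail⟩
    rcases hcond : PySem.Str.isIn pr.1 low with _ | _
    · simp only [Bool.false_eq_true, if_false]
      exact ih htail b0
    · simp only [if_true]
      have hleaf : ∃ m, pvUpd b0 pr.2 = some m ∧ m ≤ pr.2 := by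
        rcases b0 with _ | m0
        · exact ⟨pr.2, rfl, le_refl _⟩
        · simp only [pvUpd]
          split_ifs with hlt
          · exact ⟨pr.2, rfl, le_refl _⟩
          · exact ⟨m0, rfl, by omega⟩
      rcases hleaf with ⟨m, hm, hmle⟩
      rw [hm]
      exact pv_fold_noop low ps m (fun x hx => le_trans hmle (hhead x hx))

-- the gender loop is a single any() test
theorem pv_gfold (l : List String) (c : String → Bool) :
    l.foldl (fun b g => if c g then pvUpd b 1 else b) none
      = (if l.any c then some 1 else none) := by
  have noop : ∀ l' : List String,
      l'.foldl (fun b g => if c g then pvUpd b 1 else b) (some 1) = some 1 := by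
    intro l'
    induction l' with
    | nil => rfl
    | cons g l' ih =>
      simp only [List.foldl_cons]
      rcases hg : c g with _ | _ <;> simp_all [pvUpd]
  induction l with
  | nil => rfl
  | cons g l ih =>
    simp only [List.foldl_cons, List.any_cons]
    by_cases hcg : c g = true
    · simp only [hcg, if_true, Bool.true_or]
      exact noop l
    · simp only [Bool.not_eq_true] at hcg
      simp only [hcg, Bool.false_eq_true, if_false, Bool.false_or]
      exact ih

-- ===== VERDICT =====
theorem pv_upd_zero (b : Option Nat) : pvUpd b 0 = some 0 := by
  rcases b with _ | m
  · rfl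
  · simp only [pvUpd]
    split_ifs with h
    · rfl
    · congr 1; omega

theorem handle_demographic_checkbox_py_spec : Claim_equal_handle_demographic_checkbox_py := by
  intro label _
  show handle_demographic_checkbox_py label = handle_demographic_checkbox_py_alt label
  simp only [handle_demographic_checkbox_py_alt]
  rw [pv_swap]
  simp only [pv_hit_any, pv_padded]
  rw [pv_gfold, pv_fold_first _ _ (by decide)]
  have hsplit : pvSubstr =
      (["choose not to disclose", "prefer not to", "prefer not to say",
        "decline to answer", "do not wish", "rather not say"].map (fun p => (p, 0)))
      ++ (["asian", "black", "arab", "chinese", "indian", "pakistani",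
           "bangladeshi", "caribbean", "african", "irish", "gypsy",
           "welsh", "scottish", "british", "white", "mixed", "other ethnic"].map (fun p => (p, 2)))
      ++ (["heterosexual", "gay", "lesbian", "bisexual", "pansexual",
           "asexual", "queer", "homosexual", "straight"].map (fun p => (p, 3)))
      ++ (["disability", "disabled"].map (fun p => (p, 4)))
      ++ (["transgender", "trans "].map (fun p => (p, 5)))
      ++ (["caregiver", "dependent", "primary care"].map (fun p => (p, 6)))
      ++ (["veteran", "military"].map (fun p => (p, 7)))
      ++ (["not listed"].map (fun p => (p, 8)))
      ++ (["agree", "consent", "acknowledge", "confirm", "accept"].map (fun p => (p, 9))) := by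
    rfl
  rw [hsplit]
  simp only [List.find?_append, List.find?_map, Function.comp_def]
  simp only [handle_demographic_checkbox_py, pvGenders, List.any_cons, List.any_nil,
    Bool.or_false, Bool.or_assoc]
  by_cases h0 : (List.any ["choose not to disclose", "prefer not to", "prefer not to say", "decline to answer", "do not wish", "rather not say"] (fun phrase => PySem.Str.isIn phrase (PySem.Str.lower label))) = true
  · obtain ⟨pr, hpr⟩ := Option.isSome_iff_exists.mp
      (List.find?_isSome.mpr (List.any_eq_true.mp h0))
    simp only [List.any_cons, List.any_nil, Bool.or_false, Bool.or_assoc] at h0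
    simp only [h0, hpr, pv_upd_zero, pvUpd, pvResults, PySem.List.pyGet?, Option.map_some, Option.map_none, Option.none_or, Option.some_or, Bool.false_eq_true, if_false, if_true]
    first
    | decide
    | (split_ifs <;> decide)
  · have hn0 : List.find? (fun phrase => PySem.Str.isIn phrase (PySem.Str.lower label)) ["choose not to disclose", "prefer not to", "prefer not to say", "decline to answer", "do not wish", "rather not say"] = none :=
      List.find?_eq_none.mpr (List.any_eq_false.mp (eq_false_of_ne_true h0))
    simp only [List.any_cons, List.any_nil, Bool.or_false, Bool.or_assoc, Bool.not_eq_true] at h0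
    simp only [h0, hn0, pvUpd, pvResults, PySem.List.pyGet?, Option.map_some, Option.map_none, Option.none_or, Option.some_or, Bool.false_eq_true, if_false, if_true]
    by_cases hga : (List.any ["man", "woman", "non-binary", "agender", "genderfluid", "genderqueer", "gender non-conforming", "transgender"] (fun g => g == (PySem.Str.lower label) || PySem.Str.startswith (PySem.Str.lower label) (g ++ " "))) = true
    · simp only [List.any_cons, List.any_nil, Bool.or_false, Bool.or_assoc] at hga
      simp only [hga, pvUpd, pvResults, PySem.List.pyGet?, Option.map_some, Option.map_none, Option.none_or, Option.some_or, Bool.false_eq_true, if_false, if_true]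
      by_cases h2 : (List.any ["asian", "black", "arab", "chinese", "indian", "pakistani", "bangladeshi", "caribbean", "african", "irish", "gypsy", "welsh", "scottish", "british", "white", "mixed", "other ethnic"] (fun phrase => PySem.Str.isIn phrase (PySem.Str.lower label))) = true
      · obtain ⟨pr, hpr⟩ := Option.isSome_iff_exists.mp
          (List.find?_isSome.mpr (List.any_eq_true.mp h2))
        simp only [List.any_cons, List.any_nil, Bool.or_false, Bool.or_assoc] at h2
        simp only [h2, hpr, pvUpd, pvResults, PySem.List.pyGet?, Option.map_some, Option.map_none, Option.none_or, Option.some_or, Bool.false_eq_true, if_false, if_true]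
        first
        | decide
        | (split_ifs <;> decide)
      · have hn2 : List.find? (fun phrase => PySem.Str.isIn phrase (PySem.Str.lower label)) ["asian", "black", "arab", "chinese", "indian", "pakistani", "bangladeshi", "caribbean", "african", "irish", "gypsy", "welsh", "scottish", "british", "white", "mixed", "other ethnic"] = none :=
          List.find?_eq_none.mpr (List.any_eq_false.mp (eq_false_of_ne_true h2))
        simp only [List.any_cons, List.any_nil, Bool.or_false, Bool.or_assoc, Bool.not_eq_true] at h2
        simp only [h2, hn2, pvUpd, pvResults, PySem.List.pyGet?, Option.map_some, Option.map_none, Option.none_or, Option.some_or, Bool.false_eq_true, if_false, if_true]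
        by_cases h3 : (List.any ["heterosexual", "gay", "lesbian", "bisexual", "pansexual", "asexual", "queer", "homosexual", "straight"] (fun phrase => PySem.Str.isIn phrase (PySem.Str.lower label))) = true
        · obtain ⟨pr, hpr⟩ := Option.isSome_iff_exists.mp
            (List.find?_isSome.mpr (List.any_eq_true.mp h3))
          simp only [List.any_cons, List.any_nil, Bool.or_false, Bool.or_assoc] at h3
          simp only [h3, hpr, pvUpd, pvResults, PySem.List.pyGet?, Option.map_some, Option.map_none, Option.none_or, Option.some_or, Bool.false_eq_true, if_false, if_true]
          first
          | decide
          | (split_ifs <;> decide)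
        · have hn3 : List.find? (fun phrase => PySem.Str.isIn phrase (PySem.Str.lower label)) ["heterosexual", "gay", "lesbian", "bisexual", "pansexual", "asexual", "queer", "homosexual", "straight"] = none :=
            List.find?_eq_none.mpr (List.any_eq_false.mp (eq_false_of_ne_true h3))
          simp only [List.any_cons, List.any_nil, Bool.or_false, Bool.or_assoc, Bool.not_eq_true] at h3
          simp only [h3, hn3, pvUpd, pvResults, PySem.List.pyGet?, Option.map_some, Option.map_none, Option.none_or, Option.some_or, Bool.false_eq_true, if_false, if_true]
          by_cases h4 : (List.any ["disability", "disabled"] (fun phrase => PySem.Str.isIn phrase (PySem.Str.lower label))) = true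
          · obtain ⟨pr, hpr⟩ := Option.isSome_iff_exists.mp
              (List.find?_isSome.mpr (List.any_eq_true.mp h4))
            simp only [List.any_cons, List.any_nil, Bool.or_false, Bool.or_assoc] at h4
            simp only [h4, hpr, pvUpd, pvResults, PySem.List.pyGet?, Option.map_some, Option.map_none, Option.none_or, Option.some_or, Bool.false_eq_true, if_false, if_true]
            first
            | decide
            | (split_ifs <;> decide)
          · have hn4 : List.find? (fun phrase => PySem.Str.isIn phrase (PySem.Str.lower label)) ["disability", "disabled"] = none :=
              List.find?_eq_none.mpr (List.any_eq_false.mp (eq_false_of_ne_true h4))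
            simp only [List.any_cons, List.any_nil, Bool.or_false, Bool.or_assoc, Bool.not_eq_true] at h4
            simp only [h4, hn4, pvUpd, pvResults, PySem.List.pyGet?, Option.map_some, Option.map_none, Option.none_or, Option.some_or, Bool.false_eq_true, if_false, if_true]
            by_cases h5 : (List.any ["transgender", "trans "] (fun phrase => PySem.Str.isIn phrase (PySem.Str.lower label))) = true
            · obtain ⟨pr, hpr⟩ := Option.isSome_iff_exists.mp
                (List.find?_isSome.mpr (List.any_eq_true.mp h5))
              simp only [List.any_cons, List.any_nil, Bool.or_false, Bool.or_assoc] at h5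
              simp only [h5, hpr, pvUpd, pvResults, PySem.List.pyGet?, Option.map_some, Option.map_none, Option.none_or, Option.some_or, Bool.false_eq_true, if_false, if_true]
              first
              | decide
              | (split_ifs <;> decide)
            · have hn5 : List.find? (fun phrase => PySem.Str.isIn phrase (PySem.Str.lower label)) ["transgender", "trans "] = none :=
                List.find?_eq_none.mpr (List.any_eq_false.mp (eq_false_of_ne_true h5))
              simp only [List.any_cons, List.any_nil, Bool.or_false, Bool.or_assoc, Bool.not_eq_true] at h5
              simp only [h5, hn5, pvUpd, pvResults, PySem.List.pyGet?, Option.map_some, Option.map_none, Option.none_or, Option.some_or, Bool.false_eq_true, if_false, if_true]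
              by_cases h6 : (List.any ["caregiver", "dependent", "primary care"] (fun phrase => PySem.Str.isIn phrase (PySem.Str.lower label))) = true
              · obtain ⟨pr, hpr⟩ := Option.isSome_iff_exists.mp
                  (List.find?_isSome.mpr (List.any_eq_true.mp h6))
                simp only [List.any_cons, List.any_nil, Bool.or_false, Bool.or_assoc] at h6
                simp only [h6, hpr, pvUpd, pvResults, PySem.List.pyGet?, Option.map_some, Option.map_none, Option.none_or, Option.some_or, Bool.false_eq_true, if_false, if_true]
                first
                | decide
                | (split_ifs <;> decide)
              · have hn6 : List.find? (fun phrase => PySem.Str.isIn phrase (PySem.Str.lower label)) ["caregiver", "dependent", "primary care"] = none :=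
                  List.find?_eq_none.mpr (List.any_eq_false.mp (eq_false_of_ne_true h6))
                simp only [List.any_cons, List.any_nil, Bool.or_false, Bool.or_assoc, Bool.not_eq_true] at h6
                simp only [h6, hn6, pvUpd, pvResults, PySem.List.pyGet?, Option.map_some, Option.map_none, Option.none_or, Option.some_or, Bool.false_eq_true, if_false, if_true]
                by_cases h7 : (List.any ["veteran", "military"] (fun phrase => PySem.Str.isIn phrase (PySem.Str.lower label))) = true
                · obtain ⟨pr, hpr⟩ := Option.isSome_iff_exists.mp
                    (List.find?_isSome.mpr (List.any_eq_true.mp h7))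
                  simp only [List.any_cons, List.any_nil, Bool.or_false, Bool.or_assoc] at h7
                  simp only [h7, hpr, pvUpd, pvResults, PySem.List.pyGet?, Option.map_some, Option.map_none, Option.none_or, Option.some_or, Bool.false_eq_true, if_false, if_true]
                  first
                  | decide
                  | (split_ifs <;> decide)
                · have hn7 : List.find? (fun phrase => PySem.Str.isIn phrase (PySem.Str.lower label)) ["veteran", "military"] = none :=
                    List.find?_eq_none.mpr (List.any_eq_false.mp (eq_false_of_ne_true h7))
                  simp only [List.any_cons, List.any_nil, Bool.or_false, Bool.or_assoc, Bool.not_eq_true] at h7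
                  simp only [h7, hn7, pvUpd, pvResults, PySem.List.pyGet?, Option.map_some, Option.map_none, Option.none_or, Option.some_or, Bool.false_eq_true, if_false, if_true]
                  by_cases h8 : (List.any ["not listed"] (fun phrase => PySem.Str.isIn phrase (PySem.Str.lower label))) = true
                  · obtain ⟨pr, hpr⟩ := Option.isSome_iff_exists.mp
                      (List.find?_isSome.mpr (List.any_eq_true.mp h8))
                    simp only [List.any_cons, List.any_nil, Bool.or_false, Bool.or_assoc] at h8
                    simp only [h8, hpr, pvUpd, pvResults, PySem.List.pyGet?, Option.map_some, Option.map_none, Option.none_or, Option.some_or, Bool.false_eq_true, if_false, if_true]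
                    first
                    | decide
                    | (split_ifs <;> decide)
                  · have hn8 : List.find? (fun phrase => PySem.Str.isIn phrase (PySem.Str.lower label)) ["not listed"] = none :=
                      List.find?_eq_none.mpr (List.any_eq_false.mp (eq_false_of_ne_true h8))
                    simp only [List.any_cons, List.any_nil, Bool.or_false, Bool.or_assoc, Bool.not_eq_true] at h8
                    simp only [h8, hn8, pvUpd, pvResults, PySem.List.pyGet?, Option.map_some, Option.map_none, Option.none_or, Option.some_or, Bool.false_eq_true, if_false, if_true]
                    by_cases h9 : (List.any ["agree", "consent", "acknowledge", "confirm", "accept"] (fun phrase => PySem.Str.isIn phrase (PySem.Str.lower label))) = true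
                    · obtain ⟨pr, hpr⟩ := Option.isSome_iff_exists.mp
                        (List.find?_isSome.mpr (List.any_eq_true.mp h9))
                      simp only [List.any_cons, List.any_nil, Bool.or_false, Bool.or_assoc] at h9
                      simp only [h9, hpr, pvUpd, pvResults, PySem.List.pyGet?, Option.map_some, Option.map_none, Option.none_or, Option.some_or, Bool.false_eq_true, if_false, if_true]
                      first
                      | decide
                      | (split_ifs <;> decide)
                    · have hn9 : List.find? (fun phrase => PySem.Str.isIn phrase (PySem.Str.lower label)) ["agree", "consent", "acknowledge", "confirm", "accept"] = none :=
                        List.find?_eq_none.mpr (List.any_eq_false.mp (eq_false_of_ne_true h9))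
                      simp only [List.any_cons, List.any_nil, Bool.or_false, Bool.or_assoc, Bool.not_eq_true] at h9
                      simp only [h9, hn9, pvUpd, pvResults, PySem.List.pyGet?, Option.map_some, Option.map_none, Option.none_or, Option.some_or, Bool.false_eq_true, if_false, if_true]
                      decide
    · simp only [List.any_cons, List.any_nil, Bool.or_false, Bool.or_assoc, Bool.not_eq_true] at hga
      simp only [hga, pvUpd, pvResults, PySem.List.pyGet?, Option.map_some, Option.map_none, Option.none_or, Option.some_or, Bool.false_eq_true, if_false, if_true]
      by_cases h2 : (List.any ["asian", "black", "arab", "chinese", "indian", "pakistani", "bangladeshi", "caribbean", "african", "irish", "gypsy", "welsh", "scottish", "british", "white", "mixed", "other ethnic"] (fun phrase => PySem.Str.isIn phrase (PySem.Str.lower label))) = true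
      · obtain ⟨pr, hpr⟩ := Option.isSome_iff_exists.mp
          (List.find?_isSome.mpr (List.any_eq_true.mp h2))
        simp only [List.any_cons, List.any_nil, Bool.or_false, Bool.or_assoc] at h2
        simp only [h2, hpr, pvUpd, pvResults, PySem.List.pyGet?, Option.map_some, Option.map_none, Option.none_or, Option.some_or, Bool.false_eq_true, if_false, if_true]
        first
        | decide
        | (split_ifs <;> decide)
      · have hn2 : List.find? (fun phrase => PySem.Str.isIn phrase (PySem.Str.lower label)) ["asian", "black", "arab", "chinese", "indian", "pakistani", "bangladeshi", "caribbean", "african", "irish", "gypsy", "welsh", "scottish", "british", "white", "mixed", "other ethnic"] = none :=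
          List.find?_eq_none.mpr (List.any_eq_false.mp (eq_false_of_ne_true h2))
        simp only [List.any_cons, List.any_nil, Bool.or_false, Bool.or_assoc, Bool.not_eq_true] at h2
        simp only [h2, hn2, pvUpd, pvResults, PySem.List.pyGet?, Option.map_some, Option.map_none, Option.none_or, Option.some_or, Bool.false_eq_true, if_false, if_true]
        by_cases h3 : (List.any ["heterosexual", "gay", "lesbian", "bisexual", "pansexual", "asexual", "queer", "homosexual", "straight"] (fun phrase => PySem.Str.isIn phrase (PySem.Str.lower label))) = true
        · obtain ⟨pr, hpr⟩ := Option.isSome_iff_exists.mp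
            (List.find?_isSome.mpr (List.any_eq_true.mp h3))
          simp only [List.any_cons, List.any_nil, Bool.or_false, Bool.or_assoc] at h3
          simp only [h3, hpr, pvUpd, pvResults, PySem.List.pyGet?, Option.map_some, Option.map_none, Option.none_or, Option.some_or, Bool.false_eq_true, if_false, if_true]
          first
          | decide
          | (split_ifs <;> decide)
        · have hn3 : List.find? (fun phrase => PySem.Str.isIn phrase (PySem.Str.lower label)) ["heterosexual", "gay", "lesbian", "bisexual", "pansexual", "asexual", "queer", "homosexual", "straight"] = none :=
            List.find?_eq_none.mpr (List.any_eq_false.mp (eq_false_of_ne_true h3))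
          simp only [List.any_cons, List.any_nil, Bool.or_false, Bool.or_assoc, Bool.not_eq_true] at h3
          simp only [h3, hn3, pvUpd, pvResults, PySem.List.pyGet?, Option.map_some, Option.map_none, Option.none_or, Option.some_or, Bool.false_eq_true, if_false, if_true]
          by_cases h4 : (List.any ["disability", "disabled"] (fun phrase => PySem.Str.isIn phrase (PySem.Str.lower label))) = true
          · obtain ⟨pr, hpr⟩ := Option.isSome_iff_exists.mp
              (List.find?_isSome.mpr (List.any_eq_true.mp h4))
            simp only [List.any_cons, List.any_nil, Bool.or_false, Bool.or_assoc] at h4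
            simp only [h4, hpr, pvUpd, pvResults, PySem.List.pyGet?, Option.map_some, Option.map_none, Option.none_or, Option.some_or, Bool.false_eq_true, if_false, if_true]
            first
            | decide
            | (split_ifs <;> decide)
          · have hn4 : List.find? (fun phrase => PySem.Str.isIn phrase (PySem.Str.lower label)) ["disability", "disabled"] = none :=
              List.find?_eq_none.mpr (List.any_eq_false.mp (eq_false_of_ne_true h4))
            simp only [List.any_cons, List.any_nil, Bool.or_false, Bool.or_assoc, Bool.not_eq_true] at h4
            simp only [h4, hn4, pvUpd, pvResults, PySem.List.pyGet?, Option.map_some, Option.map_none, Option.none_or, Option.some_or, Bool.false_eq_true, if_false, if_true]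
            by_cases h5 : (List.any ["transgender", "trans "] (fun phrase => PySem.Str.isIn phrase (PySem.Str.lower label))) = true
            · obtain ⟨pr, hpr⟩ := Option.isSome_iff_exists.mp
                (List.find?_isSome.mpr (List.any_eq_true.mp h5))
              simp only [List.any_cons, List.any_nil, Bool.or_false, Bool.or_assoc] at h5
              simp only [h5, hpr, pvUpd, pvResults, PySem.List.pyGet?, Option.map_some, Option.map_none, Option.none_or, Option.some_or, Bool.false_eq_true, if_false, if_true]
              first
              | decide
              | (split_ifs <;> decide)
            · have hn5 : List.find? (fun phrase => PySem.Str.isIn phrase (PySem.Str.lower label)) ["transgender", "trans "] = none :=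
                List.find?_eq_none.mpr (List.any_eq_false.mp (eq_false_of_ne_true h5))
              simp only [List.any_cons, List.any_nil, Bool.or_false, Bool.or_assoc, Bool.not_eq_true] at h5
              simp only [h5, hn5, pvUpd, pvResults, PySem.List.pyGet?, Option.map_some, Option.map_none, Option.none_or, Option.some_or, Bool.false_eq_true, if_false, if_true]
              by_cases h6 : (List.any ["caregiver", "dependent", "primary care"] (fun phrase => PySem.Str.isIn phrase (PySem.Str.lower label))) = true
              · obtain ⟨pr, hpr⟩ := Option.isSome_iff_exists.mp
                  (List.find?_isSome.mpr (List.any_eq_true.mp h6))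
                simp only [List.any_cons, List.any_nil, Bool.or_false, Bool.or_assoc] at h6
                simp only [h6, hpr, pvUpd, pvResults, PySem.List.pyGet?, Option.map_some, Option.map_none, Option.none_or, Option.some_or, Bool.false_eq_true, if_false, if_true]
                first
                | decide
                | (split_ifs <;> decide)
              · have hn6 : List.find? (fun phrase => PySem.Str.isIn phrase (PySem.Str.lower label)) ["caregiver", "dependent", "primary care"] = none :=
                  List.find?_eq_none.mpr (List.any_eq_false.mp (eq_false_of_ne_true h6))
                simp only [List.any_cons, List.any_nil, Bool.or_false, Bool.or_assoc, Bool.not_eq_true] at h6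
                simp only [h6, hn6, pvUpd, pvResults, PySem.List.pyGet?, Option.map_some, Option.map_none, Option.none_or, Option.some_or, Bool.false_eq_true, if_false, if_true]
                by_cases h7 : (List.any ["veteran", "military"] (fun phrase => PySem.Str.isIn phrase (PySem.Str.lower label))) = true
                · obtain ⟨pr, hpr⟩ := Option.isSome_iff_exists.mp
                    (List.find?_isSome.mpr (List.any_eq_true.mp h7))
                  simp only [List.any_cons, List.any_nil, Bool.or_false, Bool.or_assoc] at h7
                  simp only [h7, hpr, pvUpd, pvResults, PySem.List.pyGet?, Option.map_some, Option.map_none, Option.none_or, Option.some_or, Bool.false_eq_true, if_false, if_true]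
                  first
                  | decide
                  | (split_ifs <;> decide)
                · have hn7 : List.find? (fun phrase => PySem.Str.isIn phrase (PySem.Str.lower label)) ["veteran", "military"] = none :=
                    List.find?_eq_none.mpr (List.any_eq_false.mp (eq_false_of_ne_true h7))
                  simp only [List.any_cons, List.any_nil, Bool.or_false, Bool.or_assoc, Bool.not_eq_true] at h7
                  simp only [h7, hn7, pvUpd, pvResults, PySem.List.pyGet?, Option.map_some, Option.map_none, Option.none_or, Option.some_or, Bool.false_eq_true, if_false, if_true]
                  by_cases h8 : (List.any ["not listed"] (fun phrase => PySem.Str.isIn phrase (PySem.Str.lower label))) = true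
                  · obtain ⟨pr, hpr⟩ := Option.isSome_iff_exists.mp
                      (List.find?_isSome.mpr (List.any_eq_true.mp h8))
                    simp only [List.any_cons, List.any_nil, Bool.or_false, Bool.or_assoc] at h8
                    simp only [h8, hpr, pvUpd, pvResults, PySem.List.pyGet?, Option.map_some, Option.map_none, Option.none_or, Option.some_or, Bool.false_eq_true, if_false, if_true]
                    first
                    | decide
                    | (split_ifs <;> decide)
                  · have hn8 : List.find? (fun phrase => PySem.Str.isIn phrase (PySem.Str.lower label)) ["not listed"] = none :=
                      List.find?_eq_none.mpr (List.any_eq_false.mp (eq_false_of_ne_true h8))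
                    simp only [List.any_cons, List.any_nil, Bool.or_false, Bool.or_assoc, Bool.not_eq_true] at h8
                    simp only [h8, hn8, pvUpd, pvResults, PySem.List.pyGet?, Option.map_some, Option.map_none, Option.none_or, Option.some_or, Bool.false_eq_true, if_false, if_true]
                    by_cases h9 : (List.any ["agree", "consent", "acknowledge", "confirm", "accept"] (fun phrase => PySem.Str.isIn phrase (PySem.Str.lower label))) = true
                    · obtain ⟨pr, hpr⟩ := Option.isSome_iff_exists.mp
                        (List.find?_isSome.mpr (List.any_eq_true.mp h9))
                      simp only [List.any_cons, List.any_nil, Bool.or_false, Bool.or_assoc] at h9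
                      simp only [h9, hpr, pvUpd, pvResults, PySem.List.pyGet?, Option.map_some, Option.map_none, Option.none_or, Option.some_or, Bool.false_eq_true, if_false, if_true]
                      first
                      | decide
                      | (split_ifs <;> decide)
                    · have hn9 : List.find? (fun phrase => PySem.Str.isIn phrase (PySem.Str.lower label)) ["agree", "consent", "acknowledge", "confirm", "accept"] = none :=
                        List.find?_eq_none.mpr (List.any_eq_false.mp (eq_false_of_ne_true h9))
                      simp only [List.any_cons, List.any_nil, Bool.or_false, Bool.or_assoc, Bool.not_eq_true] at h9
                      simp only [h9, hn9, pvUpd, pvResults, PySem.List.pyGet?, Option.map_some, Option.map_none, Option.none_or, Option.some_or, Bool.false_eq_true, if_false, if_true]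
                      all_goals first
                        | rfl
                        | decide
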